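-- pv_equiv track=rewrite | github.com/lxq8191/Algorithms_And_Data_Structures | nowcoder/first3str.py | first3str
-- ===== SOURCE A (Python) =====
-- def first3str(ss):
--     dic = {}
--     for i in range(len(ss)):
--         if ss[i] in dic.keys():
--             if dic[ss[i]] == 2:
--                 return ss[i]
--             else:
--                 dic[ss[i]] += 1
--         else:
--             dic[ss[i]] = 1
--     return -1
-- ===== SOURCE B (Python) =====
-- def first3str(ss):
--     # Staged approach: per distinct char, its occurrence-index list; the answer is the
--     # character whose THIRD occurrence index is smallest (min over thirds), not a scan.
--     thirds = [idxs[2]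
--               for c in dict.fromkeys(ss)
--               for idxs in [[i for i, x in enumerate(ss) if x == c]]
--               if len(idxs) >= 3]
--     if not thirds:
--         return -1
--     return ss[min(thirds)]
-- ===== Notes on version B (the rewrite author's own statement) =====
-- stated objective: alternative
-- what changed: Replaces A's single early-returning counting scan with a staged computation: build the occurrence-index list of every distinct character, collect each third-occurrence index, and return the character at the minimum such index (argmin selection instead of an online counter loop).
-- outside the precondition, e.g. on first3str('ab'): A returns -1, B returns -1; on first3str('-1'): A returns -1, B returns -1
import Mathlib
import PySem

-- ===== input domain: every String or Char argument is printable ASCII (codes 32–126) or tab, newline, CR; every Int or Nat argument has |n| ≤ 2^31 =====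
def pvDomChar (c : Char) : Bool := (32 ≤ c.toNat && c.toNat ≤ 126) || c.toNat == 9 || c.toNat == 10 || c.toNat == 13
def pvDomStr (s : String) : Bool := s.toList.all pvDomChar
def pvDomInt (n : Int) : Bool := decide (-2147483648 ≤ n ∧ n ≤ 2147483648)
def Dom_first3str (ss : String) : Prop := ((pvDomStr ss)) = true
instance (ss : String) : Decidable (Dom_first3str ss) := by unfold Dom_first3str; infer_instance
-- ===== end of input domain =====

-- B replaces A's early-returning counting scan by a staged computation (occurrence-index
-- list per distinct character, then the minimum third-occurrence index): objective
-- 'alternative', same return value on every input where A returns a string.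

-- ===== PORT A =====
-- loop 'for i in range(len(ss))' reading ss[i] in order = structural recursion over the chars,
-- carrying the dict; 'return -1' (an int, outside Pre_) is represented as "-1".
def first3strGo (r : List Char) (dic : PySem.Dict Char Int) : String :=
  match r with
  | [] => "-1"
  | c :: rest =>
    if dic.contains c then
      if dic.getD c 0 == 2 then String.ofList [c]
      else first3strGo rest (dic.insert c (dic.getD c 0 + 1))
    else first3strGo rest (dic.insert c 1)

def first3str (ss : String) : String := first3strGo ss.toList PySem.Dict.empty

-- ===== PORT B =====
-- '[i for i, x in enumerate(ss) if x == c]': the occurrence-index list of c.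
def first3strIdxs (L : List Char) (c : Char) : List Int :=
  ((PySem.List.enumerate L 0).filter (fun p => p.2 == c)).map (fun p => p.1)

-- the comprehension 'thirds': for each c in dict.fromkeys(ss) (= PySem.List.dedup),
-- keep idxs[2] when len(idxs) >= 3 ('idxs.getD 2 0' is exact under that guard).
def first3strThirds (L : List Char) : List Int :=
  (PySem.List.dedup L).flatMap (fun c =>
    let idxs := first3strIdxs L c
    if 3 ≤ idxs.length then [idxs.getD 2 0] else [])

-- 'return ss[min(thirds)]' (a one-character string) / 'return -1' when thirds is empty;
-- the ''.getD' default character is unreachable (min(thirds) is always a valid index).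
def first3str_alt (ss : String) : String :=
  let thirds := first3strThirds ss.toList
  match PySem.List.min? thirds (fun x => x) with
  | none => "-1"
  | some m => String.ofList [(PySem.Str.pyGet? ss m).getD ' ']

-- ===== PRECONDITION & SPEC =====
-- Pre_ excludes exactly the strings in which no character occurs three times: there the Python A
-- returns the int -1, not a value of the declared str return type (B returns -1 there too,
-- and both ports represent it as the string "-1").
def Pre_first3str (ss : String) : Prop :=
  (ss.toList.any (fun c => 3 ≤ ss.toList.count c)) = true
instance (ss : String) : Decidable (Pre_first3str ss) := by unfold Pre_first3str; infer_instance
def pvWitness_first3str : String := "aaa"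

def Spec_first3str (ss : String) (out : String) : Prop := out = first3str_alt ss
instance (ss : String) (out : String) : Decidable (Spec_first3str ss out) := by unfold Spec_first3str; infer_instance

-- ===== CLAIM (what is proved, stated in full; the proofs are below) =====
def Claim_equal_first3str : Prop := ∀ (ss : String), Dom_first3str ss → Pre_first3str ss → Spec_first3str ss (first3str ss)

-- ===== LEMMAS AND PROOFS =====

-- Proof-side characterisation of A: the first index whose (i+1)-prefix contains its
-- character exactly three times.
def first3strFind (l : List Char) (r : List Char) (i : Nat) : String :=
  match r with
  | [] => "-1"
  | c :: rest =>
    if (l.take (i + 1)).count c == 3 then String.ofList [c]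
    else first3strFind l rest (i + 1)

-- The counting-dict loop of A agrees with the prefix-count search, given the dict holds the
-- exact count of every character in the already-consumed prefix p.
theorem first3strGo_eq_find (r : List Char) : ∀ (p : List Char) (dic : PySem.Dict Char Int),
    (∀ c, dic.contains c = true ↔ 0 < p.count c) →
    (∀ c, dic.getD c 0 = (p.count c : Int)) →
    first3strGo r dic = first3strFind (p ++ r) r p.length := by
  induction r with
  | nil => intro p dic _ _; rfl
  | cons c rest ih =>
    intro p dic hmem hval
    have htake : (p ++ c :: rest).take (p.length + 1) = p ++ [c] := by
      rw [List.take_append]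
      simp
    have hcnt : ((p ++ c :: rest).take (p.length + 1)).count c = p.count c + 1 := by
      rw [htake]; simp [List.count_append]
    by_cases h3 : p.count c = 2
    · have hc : dic.contains c = true := (hmem c).2 (by omega)
      simp [first3strGo, first3strFind, hc, hval c, h3, hcnt]
    · have hstep : first3strFind (p ++ c :: rest) (c :: rest) p.length
          = first3strFind ((p ++ [c]) ++ rest) rest (p ++ [c]).length := by
        simp [first3strFind, hcnt]
        omega
      have hmem' : ∀ v c', (dic.insert c v).contains c' = true ↔ 0 < (p ++ [c]).count c' := by
        intro v c'
        rw [PySem.Dict.contains_insert]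
        by_cases hcc : c' = c
        · simp [hcc, List.count_append]
        · simp [List.count_append, hmem c', Ne.symm hcc]
          exact fun h => absurd h hcc
      have hval' : ∀ v, v = (p.count c : Int) + 1 →
          ∀ c', (dic.insert c v).getD c' 0 = ((p ++ [c]).count c' : Int) := by
        intro v hv c'
        rw [PySem.Dict.getD_insert]
        by_cases hcc : c' = c
        · simp [hcc, List.count_append, hv]
        · simp [hcc, List.count_append, hval c', Ne.symm hcc]
      by_cases hc : dic.contains c = true
      · have hne2 : ¬ (dic.getD c 0 == 2) = true := by simp [hval c]; omega
        have := ih (p ++ [c]) (dic.insert c (dic.getD c 0 + 1)) (hmem' _)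
          (hval' _ (by rw [hval c]))
        simp only [first3strGo, hc, if_true, hne2, hstep]
        rw [this]; simp
      · have h0 : p.count c = 0 := by
          by_contra h
          exact hc ((hmem c).2 (Nat.pos_of_ne_zero h))
        have := ih (p ++ [c]) (dic.insert c 1) (hmem' _)
          (hval' 1 (by rw [h0]; simp))
        simp only [first3strGo, hc, Bool.false_eq_true, if_false, hstep]
        rw [this]

theorem first3str_eq_find (ss : String) :
    first3str ss = first3strFind ss.toList ss.toList 0 := by
  unfold first3str
  have := first3strGo_eq_find ss.toList [] PySem.Dict.empty
    (by intro c; simp [PySem.Dict.contains_empty])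
    (by intro c; simp [PySem.Dict.getD_empty])
  simpa using this

-- ---- B side ----

-- occurrence indices as naturals, recursively
def occN : List Char → Char → List Nat
  | [], _ => []
  | x :: t, c => if x = c then 0 :: (occN t c).map (· + 1) else (occN t c).map (· + 1)

theorem length_occN (L : List Char) (c : Char) : (occN L c).length = L.count c := by
  induction L with
  | nil => rfl
  | cons x t ih =>
    by_cases h : x = c <;> simp [occN, h, ih]

theorem idxs_eq_occN_shift (L : List Char) (c : Char) : ∀ (s : Int),
    ((PySem.List.enumerate L s).filter (fun p => p.2 == c)).map (fun p => p.1)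
      = (occN L c).map (fun n : Nat => s + (n : Int)) := by
  induction L with
  | nil => intro s; simp [PySem.List.enumerate_nil, occN]
  | cons x t ih =>
    intro s
    rw [PySem.List.enumerate_cons]
    by_cases h : x = c
    · have hb : (x == c) = true := by simp [h]
      rw [occN, if_pos h, List.filter_cons]
      simp only [hb, if_pos, List.map_cons, ih (s + 1), List.map_map]
      congr 1
      · simp
      apply List.map_congr_left
      intro n _
      simp
      ring
    · have hb : (x == c) = false := by simp [h]
      rw [occN, if_neg h, List.filter_cons]
      simp only [hb, Bool.false_eq_true, if_false, ih (s + 1), List.map_map]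
      apply List.map_congr_left
      intro n _
      simp
      ring

theorem first3strIdxs_eq (L : List Char) (c : Char) :
    first3strIdxs L c = (occN L c).map (fun n : Nat => (n : Int)) := by
  unfold first3strIdxs
  rw [idxs_eq_occN_shift L c 0]
  simp

theorem occN_spec (L : List Char) (c : Char) : ∀ (k j : Nat),
    (occN L c)[k]? = some j →
    j < L.length ∧ L.getD j ' ' = c ∧ (L.take (j + 1)).count c = k + 1 := by
  induction L with
  | nil => intro k j h; simp [occN] at h
  | cons x t ih =>
    intro k j h
    by_cases hx : x = c
    · simp only [occN, hx, if_pos] at h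
      match k, j, h with
      | 0, j, h =>
        simp at h
        subst h
        simp [hx]
      | k + 1, j, h =>
        simp only [List.getElem?_cons_succ, List.getElem?_map] at h
        cases hj : (occN t c)[k]? with
        | none => rw [hj] at h; simp at h
        | some j' =>
          rw [hj] at h; simp at h
          obtain ⟨h1, h2, h3⟩ := ih k j' hj
          subst h
          refine ⟨by simpa using h1, by simpa using h2, ?_⟩
          simp [List.take_succ_cons, hx, h3]
    · simp only [occN, hx, if_neg, not_false_iff] at h
      simp only [List.getElem?_map] at h
      cases hj : (occN t c)[k]? with
      | none => rw [hj] at h; simp at h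
      | some j' =>
        rw [hj] at h; simp at h
        obtain ⟨h1, h2, h3⟩ := ih k j' hj
        subst h
        refine ⟨by simpa using h1, by simpa using h2, ?_⟩
        have : (x == c) = false := by simp [hx]
        simp [List.take_succ_cons, h3, hx]

theorem occN_complete (L : List Char) (c : Char) : ∀ (k j : Nat),
    j < L.length → L.getD j ' ' = c → (L.take (j + 1)).count c = k + 1 →
    (occN L c)[k]? = some j := by
  induction L with
  | nil => intro k j h; simp at h
  | cons x t ih =>
    intro k j hj hc hcnt
    by_cases hx : x = c
    · cases j with
      | zero =>
        have : k = 0 := by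
          simp [List.take_succ_cons, hx] at hcnt
          omega
        subst this
        simp [occN, hx]
      | succ j' =>
        have hc' : t.getD j' ' ' = c := by simpa using hc
        have hj' : j' < t.length := by simpa using hj
        have hcnt' : (t.take (j' + 1)).count c = k := by
          simp [List.take_succ_cons, hx] at hcnt
          omega
        have ht : t[j'] = c := by
          rw [List.getD_eq_getElem?_getD] at hc'
          simpa [List.getElem?_eq_getElem hj'] using hc'
        have htk : t.take (j' + 1) = t.take j' ++ [c] := by
          rw [List.take_succ, List.getElem?_eq_getElem hj', ht]
          rfl
        have hk : 1 ≤ k := by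
          rw [htk, List.count_append] at hcnt'
          simp at hcnt'
          omega
        obtain ⟨k', rfl⟩ : ∃ k', k = k' + 1 := ⟨k - 1, by omega⟩
        have := ih k' j' hj' hc' (by omega)
        simp [occN, hx, this]
    · cases j with
      | zero =>
        exfalso
        have : x = c := by simpa using hc
        exact hx this
      | succ j' =>
        have hc' : t.getD j' ' ' = c := by simpa using hc
        have hj' : j' < t.length := by simpa using hj
        have hxc : (x == c) = false := by simp [hx]
        have hcnt' : (t.take (j' + 1)).count c = k + 1 := by
          simp [List.take_succ_cons, List.count_cons, hxc] at hcnt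
          simpa [hx] using hcnt
        have := ih k j' hj' hc' hcnt'
        simp [occN, hx, this]

-- the boolean "index j is a third occurrence" test
def thirdAt (L : List Char) (j : Nat) : Bool :=
  decide (j < L.length) && ((L.take (j + 1)).count (L.getD j ' ') == 3)

theorem mem_thirds_iff (L : List Char) (y : Int) :
    y ∈ first3strThirds L ↔ ∃ j : Nat, y = (j : Int) ∧ thirdAt L j = true := by
  unfold first3strThirds
  simp only [List.mem_flatMap]
  constructor
  · rintro ⟨c, hc, hy⟩
    rw [first3strIdxs_eq] at hy
    by_cases h3 : 3 ≤ ((occN L c).map (fun n : Nat => (n : Int))).length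
    · rw [if_pos h3] at hy
      simp at hy
      subst hy
      have hlen : 2 < (occN L c).length := by simpa using h3
      have hget : (occN L c)[2]? = some ((occN L c)[2]'hlen) := List.getElem?_eq_getElem hlen
      obtain ⟨h1, h2, hcc⟩ := occN_spec L c 2 _ hget
      refine ⟨(occN L c)[2]'hlen, ?_, ?_⟩
      · simp [List.getD_eq_getElem?_getD, hget]
      · have h2' : L[(occN L c)[2]'hlen] = c := by
          rw [List.getD_eq_getElem?_getD, List.getElem?_eq_getElem h1] at h2
          simpa using h2
        unfold thirdAt
        simp [h1, h2', hcc]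
    · rw [if_neg h3] at hy
      simp at hy
  · rintro ⟨j, rfl, hj⟩
    unfold thirdAt at hj
    simp only [Bool.and_eq_true, decide_eq_true_eq, beq_iff_eq] at hj
    obtain ⟨hjl, hcnt⟩ := hj
    set c := L.getD j ' ' with hc
    have hmemL : c ∈ L := by
      rw [hc, List.getD_eq_getElem?_getD, List.getElem?_eq_getElem hjl]
      exact List.getElem_mem _
    have hcount : 3 ≤ L.count c := by
      have hsub : (L.take (j + 1)).Sublist L := List.take_sublist _ _
      have := hsub.count_le c
      omega
    have hlen : 2 < (occN L c).length := by
      rw [length_occN]; omega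
    have hcomp : (occN L c)[2]? = some j := occN_complete L c 2 j hjl rfl hcnt
    refine ⟨c, by simpa [PySem.List.mem_dedup] using hmemL, ?_⟩
    rw [first3strIdxs_eq]
    rw [if_pos (by simp; omega)]
    simp only [List.mem_singleton]
    simp [List.getD_eq_getElem?_getD, hcomp]

-- the Find scan equals the min-of-thirds selection
theorem find_eq_min (L : List Char) : ∀ (r : List Char) (i : Nat),
    L.drop i = r → (∀ j, j < i → thirdAt L j = false) →
    first3strFind L r i
      = match PySem.List.min? (first3strThirds L) (fun x => x) with
        | none => "-1"
        | some m => String.ofList [L.getD m.toNat ' '] := by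
  intro r
  induction r with
  | nil =>
    intro i hdrop hlow
    have hlen : L.length ≤ i := by
      by_contra h
      push_neg at h
      have := List.drop_eq_nil_iff.1 hdrop
      omega
    have hT : first3strThirds L = [] := by
      rw [List.eq_nil_iff_forall_not_mem]
      intro y hy
      obtain ⟨j, rfl, hj⟩ := (mem_thirds_iff L y).1 hy
      have hjl : j < L.length := by
        unfold thirdAt at hj
        simp only [Bool.and_eq_true, decide_eq_true_eq] at hj
        exact hj.1
      have := hlow j (by omega)
      rw [this] at hj
      exact Bool.false_ne_true hj
    rw [hT]
    simp [first3strFind, (PySem.List.min?_eq_none_iff _ _).2 rfl]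
  | cons c rest ih =>
    intro i hdrop hlow
    have hi : i < L.length := by
      by_contra h
      push_neg at h
      rw [List.drop_eq_nil_iff.2 h] at hdrop
      simp at hdrop
    have hc : L.getD i ' ' = c := by
      have h0 : (L.drop i)[0]? = some c := by rw [hdrop]; simp
      rw [List.getElem?_drop] at h0
      simp only [Nat.add_zero] at h0
      rw [List.getD_eq_getElem?_getD, h0]
      rfl
    by_cases h3 : thirdAt L i = true
    · -- A returns c here; min of thirds is i
      have hcnt : ((L.take (i + 1)).count c == 3) = true := by
        unfold thirdAt at h3
        simp only [Bool.and_eq_true] at h3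
        rw [← hc]
        exact h3.2
      have hmemT : (i : Int) ∈ first3strThirds L := (mem_thirds_iff L _).2 ⟨i, rfl, h3⟩
      have hne : first3strThirds L ≠ [] := fun h => by simp [h] at hmemT
      obtain ⟨m, hm⟩ : ∃ m, PySem.List.min? (first3strThirds L) (fun x => x) = some m := by
        cases hmin : PySem.List.min? (first3strThirds L) (fun x => x) with
        | none => exact absurd ((PySem.List.min?_eq_none_iff _ _).1 hmin) hne
        | some m => exact ⟨m, rfl⟩
      have hmmem := PySem.List.min?_mem hm
      obtain ⟨j', hj'eq, hj'⟩ := (mem_thirds_iff L m).1 hmmem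
      have hmin_le : m ≤ (i : Int) := PySem.List.min?_isMin hm _ hmemT
      have hij : i ≤ j' := by
        by_contra h
        push_neg at h
        have := hlow j' h
        rw [this] at hj'
        exact Bool.false_ne_true hj'
      have hmi : m = (i : Int) := by omega
      rw [hm, hmi]
      simp only [Int.toNat_natCast, hc]
      simp [first3strFind, hcnt]
    · -- step
      have hcnt : ((L.take (i + 1)).count c == 3) = false := by
        rw [← hc]
        unfold thirdAt at h3
        simp only [Bool.and_eq_true, decide_eq_true_eq] at h3
        by_contra hcontra
        simp only [Bool.not_eq_false] at hcontra
        exact h3 ⟨hi, hcontra⟩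
      have hdrop' : L.drop (i + 1) = rest := by
        have : L.drop (i + 1) = (L.drop i).tail := by
          rw [← List.drop_drop]
          simp
        rw [this, hdrop]
        rfl
      have hlow' : ∀ j, j < i + 1 → thirdAt L j = false := by
        intro j hj
        by_cases hji : j < i
        · exact hlow j hji
        · have : j = i := by omega
          subst this
          simpa using h3
      have := ih (i + 1) hdrop' hlow'
      simp only [first3strFind, hcnt, Bool.false_eq_true, if_false]
      exact this

theorem alt_eq_find (ss : String) :
    first3str_alt ss = first3strFind ss.toList ss.toList 0 := by
  rw [find_eq_min ss.toList ss.toList 0 (by simp) (by intro j hj; omega)]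
  unfold first3str_alt
  cases hmin : PySem.List.min? (first3strThirds ss.toList) (fun x => x) with
  | none => simp only [hmin]
  | some m =>
    simp only [hmin]
    have hmmem := PySem.List.min?_mem hmin
    obtain ⟨j, rfl, hj⟩ := (mem_thirds_iff ss.toList m).1 hmmem
    have hjl : j < ss.toList.length := by
      unfold thirdAt at hj
      simp only [Bool.and_eq_true, decide_eq_true_eq] at hj
      exact hj.1
    -- ss[m] for 0 ≤ m < len(ss) is exactly the character at index m
    have hchar : (PySem.Str.pyGet? ss ((j : Nat) : Int)).getD ' ' = ss.toList.getD j ' ' := by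
      simp [List.getElem?_eq_getElem hjl, List.getD_eq_getElem?_getD]
    rw [hchar]
    simp

-- ===== VERDICT (by name: the statement is the Claim_ definition above) =====
theorem first3str_spec : Claim_equal_first3str := by
  intro ss _ _
  unfold Spec_first3str
  rw [alt_eq_find, first3str_eq_find]
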